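-- pv_equiv track=rewrite | github.com/Jessewb786/Silaty | hijra.py | hijri_to_absolute
-- ===== SOURCE A (Python) =====
-- __p_const=191
--
-- __q_const=360
--
-- __a_const=48
--
-- __hijri_epoch=227015 # = Julian 0622-7-16 = gregorian 0759-6-11 (I think it should be 622, 7, 19)
--
-- def hijri_days_before_month(Y,M):
--    """Return the number of days before a given moth M in a given year Y (0 for M=1)"""
--    Mc = (Y -1) *12 + 1 + __a_const
--    McM=Mc * __p_const
--    sum=0
--    for i in range(1,M):
--       if (McM % __q_const)  < __p_const : sum+=30
--       else: sum+=29
--       McM+=__p_const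
--    return sum
--
-- def hijri_year_days(Y):
--    """Return the number of days in a given year Y"""
--    return hijri_days_before_month(Y,13)
--
-- def hijri_day_number (Y, M, D):
--    """Return the day number within the year of the Islamic date (Y, M, D), 1 for 1/1 in any year"""
--    return hijri_days_before_month(Y,M)+D
--
-- def hijri_to_absolute (Y, M, D):
--    """Return absolute date of Hijri (Y,M,D), eg. ramadan (9),1,1427 -> 732578 """
--    Mc=(Y-1)*12
--    # day count=days before Hijra plus (...)
--    dc=__hijri_epoch
--    # plus days in the years before till first multiples of q plus (...)
--    Mc-=Mc % __q_const
--    y=Y-Mc//12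
--    dc+=Mc*29 + Mc*__p_const//__q_const
--    # plus those after the multiples plus (...)
--    for i in range(1,y): dc += hijri_year_days(i)
--    # plus days from the begining of that year
--    dc+=hijri_day_number (Y, M, D) - 1
--    return dc
-- ===== SOURCE B (Python) =====
-- def hijri_to_absolute(Y, M, D):
--     """Return absolute date of Hijri (Y,M,D), eg. ramadan (9),1,1427 -> 732578 """
--     # months elapsed since year 1, month 1 (the month loop of A never runs for M <= 1)
--     n = (Y - 1) * 12 + max(M - 1, 0)
--     # cumulative month lengths telescope: each month k is 30 days iff 191*k % 360 < 191,
--     # so the number of days in the first n months is 29*n + (191*(n+48))//360 - 25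
--     return 227015 + D - 1 + 29 * n + (191 * (n + 48)) // 360 - 25
-- ===== Notes on version B (the rewrite author's own statement) =====
-- stated objective: faster
-- what changed: Replaces A's per-year and per-month loops (the leap-month test telescopes into a floor division) by a single O(1) closed-form expression 227015 + D - 1 + 29*n + (191*(n+48))//360 - 25 with n the number of elapsed months.
import Mathlib
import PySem

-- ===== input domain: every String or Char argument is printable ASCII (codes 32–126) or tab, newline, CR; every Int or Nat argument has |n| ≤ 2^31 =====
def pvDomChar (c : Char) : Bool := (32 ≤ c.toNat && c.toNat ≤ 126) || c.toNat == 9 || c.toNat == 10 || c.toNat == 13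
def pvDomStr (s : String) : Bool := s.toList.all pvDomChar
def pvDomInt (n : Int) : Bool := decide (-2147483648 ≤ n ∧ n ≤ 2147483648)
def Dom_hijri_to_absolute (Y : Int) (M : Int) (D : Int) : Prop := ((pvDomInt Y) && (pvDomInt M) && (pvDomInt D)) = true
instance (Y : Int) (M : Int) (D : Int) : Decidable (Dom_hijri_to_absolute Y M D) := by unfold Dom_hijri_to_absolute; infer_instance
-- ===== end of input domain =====

-- B replaces A's year/month loops by one O(1) closed-form floor expression (objective: faster).

-- ===== PORT A =====
def hijri_days_before_month (Y : Int) (M : Int) : Int :=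
  let Mc := (Y - 1) * 12 + 1 + 48
  let McM := Mc * 191
  ((PySem.List.pyRange 1 M 1).foldl
      (fun (st : Int × Int) _ =>
        (if PySem.Int.mod st.2 360 < 191 then st.1 + 30 else st.1 + 29, st.2 + 191))
      (0, McM)).1

def hijri_year_days (Y : Int) : Int := hijri_days_before_month Y 13

def hijri_day_number (Y : Int) (M : Int) (D : Int) : Int :=
  hijri_days_before_month Y M + D

def hijri_to_absolute (Y : Int) (M : Int) (D : Int) : Int :=
  let Mc := (Y - 1) * 12
  let dc : Int := 227015
  let Mc := Mc - PySem.Int.mod Mc 360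
  let y := Y - PySem.Int.floordiv Mc 12
  let dc := dc + Mc * 29 + PySem.Int.floordiv (Mc * 191) 360
  let dc := (PySem.List.pyRange 1 y 1).foldl (fun dc i => dc + hijri_year_days i) dc
  dc + hijri_day_number Y M D - 1

-- ===== PORT B =====
def hijri_to_absolute_alt (Y : Int) (M : Int) (D : Int) : Int :=
  let n := (Y - 1) * 12 + max (M - 1) 0
  227015 + D - 1 + 29 * n + PySem.Int.floordiv (191 * (n + 48)) 360 - 25

-- ===== PRECONDITION & SPEC =====
def Spec_hijri_to_absolute (Y : Int) (M : Int) (D : Int) (out : Int) : Prop := out = hijri_to_absolute_alt Y M D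
instance (Y : Int) (M : Int) (D : Int) (out : Int) : Decidable (Spec_hijri_to_absolute Y M D out) := by unfold Spec_hijri_to_absolute; infer_instance

-- ===== CLAIM (what is proved, stated in full; the proofs are below) =====
def Claim_equal_hijri_to_absolute : Prop := ∀ (Y : Int) (M : Int) (D : Int), Dom_hijri_to_absolute Y M D → Spec_hijri_to_absolute Y M D (hijri_to_absolute Y M D)

-- ===== LEMMAS AND PROOFS =====

-- one step of the month loop, as a difference of floor divisions
theorem pvStep_eq (x : Int) :
    (if x % 360 < 191 then (30 : Int) else 29) = 29 + x / 360 - (x - 191) / 360 := by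
  split_ifs with h <;> omega

-- the month loop in closed form
theorem pvMonthFold (m : Nat) (s c : Int) :
    ((PySem.List.pyRange 1 (1 + (m : Int)) 1).foldl
        (fun (st : Int × Int) _ =>
          (if PySem.Int.mod st.2 360 < 191 then st.1 + 30 else st.1 + 29, st.2 + 191))
        (s, c * 191))
    = (s + 29 * m + ((c + m - 1) * 191) / 360 - ((c - 1) * 191) / 360, (c + m) * 191) := by
  induction m with
  | zero =>
      rw [PySem.List.pyRange_one_eq_nil (by norm_num)]
      simp
  | succ k ih =>
      have h1 : (1 : Int) + ((k + 1 : Nat) : Int) = (1 + (k : Int)) + 1 := by push_cast; ring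
      rw [h1, PySem.List.pyRange_one_succ_right (by omega), List.foldl_append, ih]
      simp only [List.foldl_cons, List.foldl_nil]
      have hmod : PySem.Int.mod ((c + (k : Int)) * 191) 360 = ((c + (k : Int)) * 191) % 360 :=
        PySem.Int.mod_eq_emod_of_pos (by norm_num)
      rw [hmod, Prod.mk.injEq]
      refine ⟨?_, ?_⟩
      · have := pvStep_eq ((c + (k : Int)) * 191)
        have harg : (c + (k : Int)) * 191 - 191 = (c + (k : Int) - 1) * 191 := by ring
        rw [harg] at this
        have hc : (c + ((k + 1 : Nat) : Int) - 1) = (c + (k : Int)) := by push_cast; ring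
        rw [hc]
        split_ifs at this ⊢ with h <;> push_cast <;> omega
      · push_cast; ring

-- days-before-month in closed form (m = max (M-1) 0 months elapsed in year Y)
theorem pvDaysBefore_eq (Y M : Int) :
    hijri_days_before_month Y M
      = 29 * max (M - 1) 0 + ((12 * Y + 36 + max (M - 1) 0) * 191) / 360
        - ((12 * Y + 36) * 191) / 360 := by
  have hm : (1 : Int) + (((M - 1).toNat : Nat) : Int) = max M 1 := by omega
  have hrange : PySem.List.pyRange 1 M 1 = PySem.List.pyRange 1 (1 + (((M - 1).toNat : Nat) : Int)) 1 := by
    by_cases h : M ≤ 1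
    · rw [PySem.List.pyRange_one_eq_nil h, PySem.List.pyRange_one_eq_nil (by omega)]
    · rw [hm]; congr 1; omega

  simp only [hijri_days_before_month, hrange, pvMonthFold]
  have h1 : ((Y - 1) * 12 + 1 + 48 + ((M - 1).toNat : Int) - 1) = 12 * Y + 36 + max (M - 1) 0 := by omega
  have h2 : ((Y - 1) * 12 + 1 + 48 - 1 : Int) = 12 * Y + 36 := by ring
  rw [h1, h2]
  omega

-- a year's length in closed form
theorem pvYearDays_eq (i : Int) :
    hijri_year_days i = 348 + ((12 * i + 48) * 191) / 360 - ((12 * i + 36) * 191) / 360 := by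
  rw [hijri_year_days, pvDaysBefore_eq]
  norm_num
  congr 1
  ring

-- the year loop telescopes
theorem pvYearFold (y : Nat) (dc : Int) :
    (PySem.List.pyRange 1 (1 + (y : Int)) 1).foldl (fun dc i => dc + hijri_year_days i) dc
      = dc + 348 * y + ((12 * (y : Int) + 48) * 191) / 360 - (48 * 191) / 360 := by
  induction y generalizing dc with
  | zero =>
      rw [PySem.List.pyRange_one_eq_nil (by norm_num)]
      norm_num
  | succ k ih =>
      have h1 : (1 : Int) + ((k + 1 : Nat) : Int) = (1 + (k : Int)) + 1 := by push_cast; ring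
      rw [h1, PySem.List.pyRange_one_succ_right (by omega), List.foldl_append, ih]
      simp only [List.foldl_cons, List.foldl_nil]
      rw [pvYearDays_eq (1 + (k : Int))]
      have h2 : (12 * (1 + (k : Int)) + 36) = 12 * (k : Int) + 48 := by ring
      have h3 : (12 * (1 + (k : Int)) + 48) = 12 * ((k + 1 : Nat) : Int) + 48 := by push_cast; ring
      rw [h2, h3]
      push_cast
      ring

-- ===== VERDICT (by name: the statement is the Claim_ definition above) =====
theorem hijri_to_absolute_spec : Claim_equal_hijri_to_absolute := by
  intro Y M D _
  unfold Spec_hijri_to_absolute hijri_to_absolute hijri_to_absolute_alt hijri_day_number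
  simp only [PySem.Int.mod_eq_emod_of_pos (by norm_num : (0:Int) < 360),
    PySem.Int.floordiv_eq_ediv_of_pos (by norm_num : (0:Int) < 12),
    PySem.Int.floordiv_eq_ediv_of_pos (by norm_num : (0:Int) < 360)]
  rw [pvDaysBefore_eq]
  set Mc' : Int := (Y - 1) * 12 - (Y - 1) * 12 % 360 with hMc'
  obtain ⟨a, ha⟩ : ∃ a : Int, Mc' = 360 * a := ⟨(Y - 1) * 12 / 360, by omega⟩
  have h12 : Mc' / 12 = 30 * a := by omega
  have hy : Y - Mc' / 12 = 1 + (((Y - Mc' / 12 - 1).toNat : Nat) : Int) := by omega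
  rw [hy, pvYearFold]
  have hyv : (((Y - Mc' / 12 - 1).toNat : Nat) : Int) = Y - 30 * a - 1 := by omega
  rw [hyv]
  generalize max (M - 1) 0 = m
  have hd1 : (Mc' * 191) / 360 = 191 * a := by omega
  have hd2 : ((12 * (Y - 30 * a - 1) + 48) * 191) / 360 = ((12 * Y + 36) * 191) / 360 - 191 * a := by
    omega
  omega
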